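-- pv_equiv track=rewrite | github.com/ErikaRoldanRoa/Eden_Model | e_2d.py | actualize_vef
-- ===== SOURCE A (Python) =====
-- def actualize_vef(vertices, edges, nearest_n, nearest_diag):
--     """for Euler characteristics. function updates number of vertices and edges"""
--     # CHANGE! the function was wrong. it was calculating the number of vertices in a wrong way
--     v = [1] * 4
--     e = [1] * 4
--     for i in range(4):
--         if nearest_diag[i] == 1:
--             v[i] = 0
--         if nearest_n[i] == 1:
--             e[i] = 0
--             v[i-1] = 0
--             v[i] = 0
--     vertices = vertices + sum(v)
--     edges = edges + sum(e)
--
--     return vertices, edges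
-- ===== SOURCE B (Python) =====
-- def actualize_vef(vertices, edges, nearest_n, nearest_diag):
--     """for Euler characteristics. function updates number of vertices and edges"""
--     new_edges = edges + sum(1 for i in range(4) if nearest_n[i] != 1)
--     new_vertices = vertices + sum(
--         1 for i in range(4)
--         if nearest_diag[i] != 1 and nearest_n[i] != 1 and nearest_n[(i + 1) % 4] != 1
--     )
--     return new_vertices, new_edges
-- ===== Notes on version B (the rewrite author's own statement) =====
-- stated objective: simpler
-- what changed: Replaced the mutated v/e indicator arrays and the cross-index wraparound assignment v[i-1]=0 with two direct counting comprehensions: an edge survives iff nearest_n[i]!=1, a vertex survives iff neither its diagonal neighbour nor either of its two adjacent sides (nearest_n[i], nearest_n[(i+1)%4]) is occupied.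
import Mathlib
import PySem

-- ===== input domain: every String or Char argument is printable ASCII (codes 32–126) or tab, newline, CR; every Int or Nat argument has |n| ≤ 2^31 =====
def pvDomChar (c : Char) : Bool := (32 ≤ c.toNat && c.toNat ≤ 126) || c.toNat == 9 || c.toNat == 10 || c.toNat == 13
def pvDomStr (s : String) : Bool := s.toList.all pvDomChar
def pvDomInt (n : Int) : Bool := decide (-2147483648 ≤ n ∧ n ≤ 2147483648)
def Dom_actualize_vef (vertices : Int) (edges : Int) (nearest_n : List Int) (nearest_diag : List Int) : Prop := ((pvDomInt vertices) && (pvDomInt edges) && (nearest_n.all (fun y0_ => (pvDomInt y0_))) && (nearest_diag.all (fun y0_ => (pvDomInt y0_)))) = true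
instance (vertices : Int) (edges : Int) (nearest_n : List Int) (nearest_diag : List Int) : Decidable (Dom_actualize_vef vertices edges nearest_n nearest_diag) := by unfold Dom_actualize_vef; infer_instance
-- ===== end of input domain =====

-- B drops A's mutated v/e indicator arrays (including the wraparound v[i-1] zeroing) and counts
-- surviving edges/vertices directly with two comprehensions; objective: simpler.

-- ===== PORT A =====
-- literal port of A: v,e indicator lists mutated inside a loop over range(4), then summed
def actualize_vef (vertices : Int) (edges : Int) (nearest_n : List Int) (nearest_diag : List Int) : Int × Int :=
  let v : List Int := [1, 1, 1, 1]
  let e : List Int := [1, 1, 1, 1]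
  let st := (PySem.List.pyRange 0 4 1).foldl (fun (st : List Int × List Int) i =>
    let v := st.1
    let e := st.2
    let v := if PySem.List.pyGetD nearest_diag i 0 == 1 then PySem.List.pySetD v i 0 else v
    if PySem.List.pyGetD nearest_n i 0 == 1 then
      let e := PySem.List.pySetD e i 0
      let v := PySem.List.pySetD v (i - 1) 0
      let v := PySem.List.pySetD v i 0
      (v, e)
    else (v, e)) (v, e)
  (vertices + st.1.sum, edges + st.2.sum)

-- ===== PORT B =====
-- literal port of B: two counting comprehensions over range(4), no mutated arrays
def actualize_vef_alt (vertices : Int) (edges : Int) (nearest_n : List Int) (nearest_diag : List Int) : Int × Int :=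
  let new_edges := edges +
    (((PySem.List.pyRange 0 4 1).filter (fun i => PySem.List.pyGetD nearest_n i 0 != 1)).length : Int)
  let new_vertices := vertices +
    (((PySem.List.pyRange 0 4 1).filter (fun i =>
        PySem.List.pyGetD nearest_diag i 0 != 1 &&
        PySem.List.pyGetD nearest_n i 0 != 1 &&
        PySem.List.pyGetD nearest_n (PySem.Int.mod (i + 1) 4) 0 != 1)).length : Int)
  (new_vertices, new_edges)

-- ===== PRECONDITION & SPEC =====
-- Pre_ excludes exactly the inputs where Python A raises IndexError (a list shorter than 4); B raises there too.
def Pre_actualize_vef (vertices : Int) (edges : Int) (nearest_n : List Int) (nearest_diag : List Int) : Prop :=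
  4 ≤ nearest_n.length ∧ 4 ≤ nearest_diag.length
instance (vertices : Int) (edges : Int) (nearest_n : List Int) (nearest_diag : List Int) : Decidable (Pre_actualize_vef vertices edges nearest_n nearest_diag) := by unfold Pre_actualize_vef; infer_instance
def pvWitness_actualize_vef : Int × Int × List Int × List Int := (10, 20, [1, 0, 0, 0], [0, 1, 0, 0])

def Spec_actualize_vef (vertices : Int) (edges : Int) (nearest_n : List Int) (nearest_diag : List Int) (out : Int × Int) : Prop := out = actualize_vef_alt vertices edges nearest_n nearest_diag
instance (vertices : Int) (edges : Int) (nearest_n : List Int) (nearest_diag : List Int) (out : Int × Int) : Decidable (Spec_actualize_vef vertices edges nearest_n nearest_diag out) := by unfold Spec_actualize_vef; infer_instance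

-- ===== CLAIM (what is proved, stated in full; the proofs are below) =====
def Claim_equal_actualize_vef : Prop := ∀ (vertices : Int) (edges : Int) (nearest_n : List Int) (nearest_diag : List Int), Dom_actualize_vef vertices edges nearest_n nearest_diag → Pre_actualize_vef vertices edges nearest_n nearest_diag → Spec_actualize_vef vertices edges nearest_n nearest_diag (actualize_vef vertices edges nearest_n nearest_diag)

-- ===== LEMMAS AND PROOFS =====

-- heart of the proof: with both lists destructured into their first four elements, both ports
-- reduce to functions of the eight Boolean tests '== 1', and the 2^8 cases are decided
set_option maxHeartbeats 1000000 in
theorem actualize_vef_core (vertices edges a b c d da db dc dd : Int) (rn rd : List Int) :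
    actualize_vef vertices edges (a :: b :: c :: d :: rn) (da :: db :: dc :: dd :: rd)
      = actualize_vef_alt vertices edges (a :: b :: c :: d :: rn) (da :: db :: dc :: dd :: rd) := by
  have hrange : PySem.List.pyRange 0 4 1 = [0, 1, 2, 3] := by decide
  have hg0 : ∀ (x y z w : Int) (r : List Int), PySem.List.pyGetD (x :: y :: z :: w :: r) (0:Int) (0:Int) = x := by
    intro x y z w r; simp [pysem]
  have hg1 : ∀ (x y z w : Int) (r : List Int), PySem.List.pyGetD (x :: y :: z :: w :: r) (1:Int) (0:Int) = y := by
    intro x y z w r; simp [pysem]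
  have hg2 : ∀ (x y z w : Int) (r : List Int), PySem.List.pyGetD (x :: y :: z :: w :: r) (2:Int) (0:Int) = z := by
    intro x y z w r; simp [pysem]
  have hg3 : ∀ (x y z w : Int) (r : List Int), PySem.List.pyGetD (x :: y :: z :: w :: r) (3:Int) (0:Int) = w := by
    intro x y z w r; simp [pysem]
  simp only [actualize_vef, actualize_vef_alt, hrange, List.foldl, List.filter, hg0, hg1, hg2, hg3, bne,
    show PySem.Int.mod (0+1) 4 = 1 from rfl, show PySem.Int.mod (1+1) 4 = 2 from rfl,
    show PySem.Int.mod (2+1) 4 = 3 from rfl, show PySem.Int.mod (3+1) 4 = 0 from rfl]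
  generalize (a == 1) = p0
  generalize (b == 1) = p1
  generalize (c == 1) = p2
  generalize (d == 1) = p3
  generalize (da == 1) = q0
  generalize (db == 1) = q1
  generalize (dc == 1) = q2
  generalize (dd == 1) = q3
  refine Prod.ext ?_ ?_
  · show vertices + _ = vertices + _
    congr 1
    revert p0 p1 p2 p3 q0 q1 q2 q3; decide
  · show edges + _ = edges + _
    congr 1
    revert p0 p1 p2 p3 q0 q1 q2 q3; decide

-- ===== VERDICT (by name: the statement is the Claim_ definition above) =====
theorem actualize_vef_spec : Claim_equal_actualize_vef := by
  intro vertices edges nn nd _ hpre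
  obtain ⟨hn, hd⟩ := hpre
  match nn, nd with
  | a :: b :: c :: d :: rn, da :: db :: dc :: dd :: rd =>
    exact actualize_vef_core vertices edges a b c d da db dc dd rn rd
  | [], _ | [_], _ | [_, _], _ | [_, _, _], _ => simp at hn
  | _ :: _ :: _ :: _ :: _, [] | _ :: _ :: _ :: _ :: _, [_]
  | _ :: _ :: _ :: _ :: _, [_, _] | _ :: _ :: _ :: _ :: _, [_, _, _] => simp at hd
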